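-- pv_equiv track=rewrite | github.com/cirosantilli/project-euler-solutions | solvers/944.py | sev
-- ===== SOURCE A (Python) =====
-- def sev(E):
--     """
--     Sum of elevisors of a set E.
--     x in E is an elevisor if it divides another (different) element of E.
--     """
--     a = list(E)
--     s = 0
--     for i, x in enumerate(a):
--         for j, y in enumerate(a):
--             if i != j and y % x == 0:
--                 s += x
--                 break
--     return s
-- ===== SOURCE B (Python) =====
-- def sev(E):
--     """
--     Sum of elevisors of a set E.
--     x in E is an elevisor if it divides another (different) element of E.
--     """
--     cnt = {}
--     for v in E:
--         cnt[v] = cnt.get(v, 0) + 1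
--     elev = set()
--     for y in cnt:
--         ay = abs(y)
--         d = 1
--         while d * d <= ay:
--             if ay % d == 0:
--                 for t in (d, ay // d):
--                     for s in (t, -t):
--                         if s != y and s in cnt:
--                             elev.add(s)
--             d += 1
--     return sum(x * c for x, c in cnt.items() if x in elev or c >= 2)
-- ===== Notes on version B (the rewrite author's own statement) =====
-- stated objective: alternative
-- what changed: Replaces A's O(n^2) all-pairs index scan by one pass building a value->count dict, then sqrt-bounded divisor enumeration of each distinct value to mark which set members divide another element, summing x*count(x) over distinct values.
import Mathlib
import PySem

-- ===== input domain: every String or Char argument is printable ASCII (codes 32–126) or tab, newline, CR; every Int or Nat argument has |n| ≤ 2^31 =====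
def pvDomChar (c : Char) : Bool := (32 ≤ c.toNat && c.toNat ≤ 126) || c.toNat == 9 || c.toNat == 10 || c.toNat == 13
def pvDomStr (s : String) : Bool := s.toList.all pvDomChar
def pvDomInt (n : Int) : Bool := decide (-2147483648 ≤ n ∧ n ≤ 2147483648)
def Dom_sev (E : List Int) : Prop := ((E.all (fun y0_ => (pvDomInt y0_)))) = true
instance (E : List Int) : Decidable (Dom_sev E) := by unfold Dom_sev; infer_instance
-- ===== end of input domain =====

-- B replaces A's quadratic all-pairs divisibility scan by a value-count dictionary plus
-- square-root divisor enumeration of each distinct value (alternative algorithm).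

-- ===== PORT A =====
def sev (E : List Int) : Int :=
  let a := E
  (PySem.List.enumerate a).foldl
    (fun s ix =>
      if (PySem.List.enumerate a).any (fun jy => ix.1 != jy.1 && PySem.Int.mod jy.2 ix.2 == 0)
      then s + ix.2 else s) 0

-- ===== PORT B =====
-- the 'while d * d <= ay' loop of Source B; ay = abs(y) and d ≥ 1 are nonnegative Python ints,
-- so Nat arithmetic ( %, / ) is exact here.
def sevDivLoop (cnt : PySem.Dict Int Int) (y : Int) (ay : Nat) (d : Nat) (elev : PySem.Set Int) : PySem.Set Int :=
  if h : d * d ≤ ay then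
    sevDivLoop cnt y ay (d + 1)
      (if ay % d == 0 then
        ([((d : Int)), ((ay / d : Nat) : Int)]).foldl
          (fun e t => ([t, -t]).foldl
            (fun e s => if s != y && PySem.Dict.contains cnt s then PySem.Set.add e s else e) e)
          elev
      else elev)
  else elev
termination_by ay + 1 - d
decreasing_by
  rcases Nat.eq_zero_or_pos d with h0 | h0
  · omega
  · have hd : d ≤ d * d := Nat.le_mul_of_pos_left d h0
    omega

def sev_alt (E : List Int) : Int :=
  let cnt : PySem.Dict Int Int := E.foldl (fun d v => d.insert v (d.getD v 0 + 1)) PySem.Dict.empty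
  let elev : PySem.Set Int :=
    (PySem.Dict.keys cnt).foldl (fun e y => sevDivLoop cnt y y.natAbs 1 e) PySem.Set.empty
  (PySem.Dict.items cnt).foldl
    (fun s xc => if PySem.Set.contains elev xc.1 || decide ((2 : Int) ≤ xc.2) then s + xc.1 * xc.2 else s) 0

-- ===== PRECONDITION & SPEC =====
-- Pre_ excludes exactly the inputs where A raises ZeroDivisionError: a list containing 0
-- together with at least one other element (A's inner loop then evaluates y % 0).
def Pre_sev (E : List Int) : Prop := (0 : Int) ∈ E → E.length ≤ 1
instance (E : List Int) : Decidable (Pre_sev E) := by unfold Pre_sev; infer_instance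
def pvWitness_sev : List Int := [2, 4, 3]
def Spec_sev (E : List Int) (out : Int) : Prop := out = sev_alt E
instance (E : List Int) (out : Int) : Decidable (Spec_sev E out) := by unfold Spec_sev; infer_instance

-- ===== CLAIM (what is proved, stated in full; the proofs are below) =====
def Claim_equal_sev : Prop := ∀ (E : List Int), Dom_sev E → Pre_sev E → Spec_sev E (sev E)

-- ===== LEMMAS AND PROOFS =====

-- the value-level "is an elevisor" predicate both programs compute
abbrev sevP (E : List Int) (x : Int) : Prop := (∃ y ∈ E, y ≠ x ∧ x ∣ y) ∨ 2 ≤ E.count x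

-- a conditional-accumulate foldl is a sum
theorem sev_foldl_ite_add {α : Type} (l : List α) (p : α → Bool) (f : α → Int) (a : Int) :
    l.foldl (fun s x => if p x then s + f x else s) a
      = a + (l.map (fun x => if p x then f x else 0)).sum := by
  induction l generalizing a with
  | nil => simp
  | cons x t ih => by_cases h : p x <;> simp [h, ih] <;> ring

theorem sev_count_two_of_idx (E : List Int) (x : Int) :
    ∀ (i j : Nat), ∀ (hi : i < E.length) (hj : j < E.length), i ≠ j → E[i] = x → E[j] = x →
      2 ≤ E.count x := by
  induction E with
  | nil => intro i j hi; simp at hi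
  | cons a t ih =>
    intro i j hi hj hne hxi hxj
    match i, j with
    | 0, 0 => omega
    | 0, j + 1 =>
      have hxm : x ∈ t := hxj ▸ List.getElem_mem (by simpa using hj)
      have h1 : 1 ≤ t.count x := List.one_le_count_iff.mpr hxm
      have ha : a = x := by simpa using hxi
      have hcc : (a :: t).count x = t.count x + 1 := by simp [List.count_cons, ha]
      omega
    | i + 1, 0 =>
      have hxm : x ∈ t := hxi ▸ List.getElem_mem (by simpa using hi)
      have h1 : 1 ≤ t.count x := List.one_le_count_iff.mpr hxm
      have ha : a = x := by simpa using hxj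
      have hcc : (a :: t).count x = t.count x + 1 := by simp [List.count_cons, ha]
      omega
    | i + 1, j + 1 =>
      have h2 := ih i j (by simpa using hi) (by simpa using hj) (by omega)
        (by simpa using hxi) (by simpa using hxj)
      have hcc : t.count x ≤ (a :: t).count x := by
        rw [List.count_cons]; omega
      omega

theorem sev_idx_of_count_two (E : List Int) (x : Int) :
    ∀ (i : Nat), ∀ (hi : i < E.length), E[i] = x → 2 ≤ E.count x →
      ∃ j, ∃ hj : j < E.length, j ≠ i ∧ E[j] = x := by
  induction E with
  | nil => intro i hi; simp at hi
  | cons a t ih =>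
    intro i hi hxi hc
    match i with
    | 0 =>
      have ha : a = x := by simpa using hxi
      have hxm : x ∈ t := by
        rw [List.count_cons] at hc
        simp [ha] at hc
        exact hc
      obtain ⟨j, hj, hxj⟩ := List.mem_iff_getElem.mp hxm
      exact ⟨j + 1, by simpa using hj, by omega, by simpa using hxj⟩
    | i + 1 =>
      by_cases ha : a = x
      · exact ⟨0, by simp, by omega, by simpa using ha⟩
      · have hc' : 2 ≤ t.count x := by
          rw [List.count_cons] at hc
          simpa [ha] using hc
        obtain ⟨j, hj, hne, hxj⟩ := ih i (by simpa using hi) (by simpa using hxi) hc'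
        exact ⟨j + 1, by simpa using hj, by omega, by simpa using hxj⟩

-- the inner 'any' of A, at a valid index, decides exactly sevP
theorem sev_any_iff (E : List Int) (k : Nat) (hk : k < E.length) :
    ((PySem.List.enumerate E).any
        (fun jy => ((0 : Int) + (k : Int)) != jy.1 && PySem.Int.mod jy.2 E[k] == 0) = true)
      ↔ sevP E E[k] := by
  rw [List.any_eq_true]
  constructor
  · rintro ⟨jy, hmem, hcond⟩
    obtain ⟨k', hk', rfl⟩ := (PySem.List.mem_enumerate_iff _ _ _).mp hmem
    simp only [Bool.and_eq_true, bne_iff_ne, beq_iff_eq] at hcond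
    obtain ⟨hne, hmod⟩ := hcond
    have hne' : k' ≠ k := by intro h; exact hne (by simp [h])
    have hdvd : E[k] ∣ E[k'] := (PySem.Int.mod_eq_zero_iff_dvd _ _).mp hmod
    by_cases hval : E[k'] = E[k]
    · exact Or.inr (sev_count_two_of_idx E E[k] k k' hk hk' (by omega) rfl hval)
    · exact Or.inl ⟨E[k'], List.getElem_mem hk', hval, hdvd⟩
  · intro hP
    rcases hP with ⟨y, hy, hyne, hdvd⟩ | hc
    · obtain ⟨k', hk', hxk'⟩ := List.mem_iff_getElem.mp hy
      refine ⟨((0 : Int) + (k' : Int), E[k']), (PySem.List.mem_enumerate_iff _ _ _).mpr ⟨k', hk', rfl⟩, ?_⟩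
      have hne : k ≠ k' := by
        intro h; subst h; exact hyne (by rw [hxk'])
      simp only [Bool.and_eq_true, bne_iff_ne, beq_iff_eq]
      exact ⟨by simp [hne], (PySem.Int.mod_eq_zero_iff_dvd _ _).mpr (hxk' ▸ hdvd)⟩
    · obtain ⟨j, hj, hne, hxj⟩ := sev_idx_of_count_two E E[k] k hk rfl hc
      refine ⟨((0 : Int) + (j : Int), E[j]), (PySem.List.mem_enumerate_iff _ _ _).mpr ⟨j, hj, rfl⟩, ?_⟩
      simp only [Bool.and_eq_true, bne_iff_ne, beq_iff_eq]
      exact ⟨by simp [Ne.symm hne], (PySem.Int.mod_eq_zero_iff_dvd _ _).mpr (hxj ▸ dvd_refl _)⟩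

-- A computes the sum of x over E (with multiplicity) where sevP holds
theorem sev_eq_sum (E : List Int) :
    sev E = (E.map (fun x => if sevP E x then x else 0)).sum := by
  show (PySem.List.enumerate E).foldl
      (fun s ix =>
        if (PySem.List.enumerate E).any (fun jy => ix.1 != jy.1 && PySem.Int.mod jy.2 ix.2 == 0)
        then s + ix.2 else s) 0 = _
  rw [sev_foldl_ite_add (PySem.List.enumerate E)
    (fun ix => (PySem.List.enumerate E).any (fun jy => ix.1 != jy.1 && PySem.Int.mod jy.2 ix.2 == 0))
    (fun ix => ix.2) 0]
  rw [List.map_congr_left (l := PySem.List.enumerate E)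
    (g := fun ix : Int × Int => if sevP E ix.2 then ix.2 else 0) ?_]
  · rw [show (fun ix : Int × Int => if sevP E ix.2 then ix.2 else 0)
        = (fun x : Int => if sevP E x then x else 0) ∘ (fun ix : Int × Int => ix.2) from rfl,
      ← List.map_map, PySem.List.map_snd_enumerate]
    simp
  · intro ix hmem
    obtain ⟨k, hk, rfl⟩ := (PySem.List.mem_enumerate_iff _ _ _).mp hmem
    have hiff := sev_any_iff E k hk
    by_cases h : sevP E E[k]
    · rw [hiff.mpr h]
      simp [h]
    · have hb := Bool.eq_false_iff.mpr (fun hc => h (hiff.mp hc))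
      rw [hb]
      simp [h]

-- one conditional add of Source B's innermost 'if'
theorem sev_mem_condAdd (cnt : PySem.Dict Int Int) (y : Int) (e : PySem.Set Int) (s0 s : Int) :
    (s ∈ (if s0 != y && PySem.Dict.contains cnt s0 then PySem.Set.add e s0 else e)
      ↔ s ∈ e ∨ (s = s0 ∧ s0 ≠ y ∧ cnt.contains s0 = true)) := by
  split
  case isTrue h =>
    simp only [Bool.and_eq_true, bne_iff_ne] at h
    rw [PySem.Set.mem_add]
    tauto
  case isFalse h =>
    simp only [Bool.and_eq_true, bne_iff_ne, not_and_or, not_not, Bool.not_eq_true] at h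
    constructor
    · exact Or.inl
    · rintro (hm | ⟨rfl, hny, hc⟩)
      · exact hm
      · rcases h with h | h
        · exact absurd h hny
        · rw [hc] at h; cases h

-- membership in the divisor-enumeration loop
theorem sev_mem_divLoop (cnt : PySem.Dict Int Int) (y : Int) (ay : Nat) :
    ∀ (n d : Nat), ay + 1 - d = n → 1 ≤ d → ∀ (e : PySem.Set Int) (s : Int),
      (s ∈ sevDivLoop cnt y ay d e ↔ s ∈ e ∨ (s ≠ y ∧ cnt.contains s = true ∧
        ∃ k : Nat, d ≤ k ∧ k * k ≤ ay ∧ k ∣ ay ∧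
          (s = (k : Int) ∨ s = -(k : Int) ∨ s = ((ay / k : Nat) : Int) ∨ s = -((ay / k : Nat) : Int)))) := by
  intro n
  induction n using Nat.strong_induction_on with
  | _ n ih =>
    intro d hn hd e s
    rw [sevDivLoop]
    split
    case isTrue h =>
      have hdle : d ≤ ay := le_trans (Nat.le_mul_of_pos_left d (by omega)) h
      rw [ih (ay + 1 - (d + 1)) (by omega) (d + 1) rfl (by omega)]
      have hstep : ∀ e' : PySem.Set Int,
          (s ∈ (if ay % d == 0 then
              ([((d : Int)), ((ay / d : Nat) : Int)]).foldl
                (fun e t => ([t, -t]).foldl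
                  (fun e s => if s != y && PySem.Dict.contains cnt s then PySem.Set.add e s else e) e)
                e'
            else e')
          ↔ s ∈ e' ∨ (ay % d = 0 ∧ s ≠ y ∧ cnt.contains s = true ∧
              (s = ((d : Nat) : Int) ∨ s = -((d : Nat) : Int)
                ∨ s = ((ay / d : Nat) : Int) ∨ s = -((ay / d : Nat) : Int)))) := by
        intro e'
        by_cases hmod : ay % d = 0
        · simp only [hmod, beq_self_eq_true, if_true, List.foldl_cons, List.foldl_nil]
          rw [sev_mem_condAdd, sev_mem_condAdd, sev_mem_condAdd, sev_mem_condAdd]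
          constructor
          · rintro ((((hm | ⟨rfl, hny, hc⟩) | ⟨rfl, hny, hc⟩) | ⟨rfl, hny, hc⟩) | ⟨rfl, hny, hc⟩)
            · exact Or.inl hm
            · exact Or.inr ⟨by simp [hmod], hny, hc, by tauto⟩
            · exact Or.inr ⟨by simp [hmod], hny, hc, by tauto⟩
            · exact Or.inr ⟨by simp [hmod], hny, hc, by tauto⟩
            · exact Or.inr ⟨by simp [hmod], hny, hc, by tauto⟩
          · rintro (hm | ⟨-, hny, hc, (rfl | rfl | rfl | rfl)⟩)
            · exact Or.inl (Or.inl (Or.inl (Or.inl hm)))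
            · exact Or.inl (Or.inl (Or.inl (Or.inr ⟨rfl, hny, hc⟩)))
            · exact Or.inl (Or.inl (Or.inr ⟨rfl, hny, hc⟩))
            · exact Or.inl (Or.inr ⟨rfl, hny, hc⟩)
            · exact Or.inr ⟨rfl, hny, hc⟩
        · have : (ay % d == 0) = false := by simpa using hmod
          simp [this, hmod]
      rw [hstep e]
      constructor
      · rintro ((hm | ⟨hmod, hny, hc, hs⟩) | ⟨hny, hc, k, hk, hkk, hkdvd, hs⟩)
        · exact Or.inl hm
        · exact Or.inr ⟨hny, hc, d, le_refl d, h, Nat.dvd_of_mod_eq_zero hmod, hs⟩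
        · exact Or.inr ⟨hny, hc, k, by omega, hkk, hkdvd, hs⟩
      · rintro (hm | ⟨hny, hc, k, hk, hkk, hkdvd, hs⟩)
        · exact Or.inl (Or.inl hm)
        · by_cases hkd : k = d
          · subst hkd
            exact Or.inl (Or.inr ⟨Nat.mod_eq_zero_of_dvd hkdvd, hny, hc, hs⟩)
          · exact Or.inr ⟨hny, hc, k, by omega, hkk, hkdvd, hs⟩
    case isFalse h =>
      constructor
      · exact Or.inl
      · rintro (hmem | ⟨-, -, k, hdk, hkk, -⟩)
        · exact hmem
        · exact absurd (le_trans (Nat.mul_le_mul hdk hdk) hkk) h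

-- every divisor of ay ≥ 1 is reached from d = 1
theorem sev_exists_k_iff (ay : Nat) (s : Int) (hay : 1 ≤ ay) :
    (∃ k : Nat, 1 ≤ k ∧ k * k ≤ ay ∧ k ∣ ay ∧
        (s = (k : Int) ∨ s = -(k : Int) ∨ s = ((ay / k : Nat) : Int) ∨ s = -((ay / k : Nat) : Int)))
      ↔ s.natAbs ∣ ay := by
  constructor
  · rintro ⟨k, hk1, hkk, hkdvd, hs⟩
    have h1 : ((k : Int)).natAbs = k := Int.natAbs_natCast k
    have h2 : ((ay / k : Nat) : Int).natAbs = ay / k := Int.natAbs_natCast _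
    rcases hs with rfl | rfl | rfl | rfl
    · simpa [h1] using hkdvd
    · simpa [Int.natAbs_neg, h1] using hkdvd
    · simpa [h2] using Nat.div_dvd_of_dvd hkdvd
    · simpa [Int.natAbs_neg, h2] using Nat.div_dvd_of_dvd hkdvd
  · intro hdvd
    have hm1 : 1 ≤ s.natAbs := by
      rcases Nat.eq_zero_or_pos s.natAbs with h0 | h0
      · rw [h0] at hdvd
        exact absurd (Nat.eq_zero_of_zero_dvd hdvd) (by omega)
      · exact h0
    have hmay : s.natAbs ≤ ay := Nat.le_of_dvd (by omega) hdvd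
    have hsm : s = (s.natAbs : Int) ∨ s = -(s.natAbs : Int) := Int.natAbs_eq s
    by_cases hsmall : s.natAbs * s.natAbs ≤ ay
    · exact ⟨s.natAbs, hm1, hsmall, hdvd, by tauto⟩
    · refine ⟨ay / s.natAbs, Nat.div_pos hmay (by omega), ?_, Nat.div_dvd_of_dvd hdvd, ?_⟩
      · have hmul : ay / s.natAbs * s.natAbs = ay := Nat.div_mul_cancel hdvd
        have hlt : ay / s.natAbs < s.natAbs := by
          by_contra hge
          push_neg at hge
          have := Nat.mul_le_mul_right s.natAbs hge
          omega
        calc ay / s.natAbs * (ay / s.natAbs)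
            ≤ ay / s.natAbs * s.natAbs := Nat.mul_le_mul_left _ (le_of_lt hlt)
          _ = ay := hmul
      · rw [Nat.div_div_self hdvd (by omega)]
        tauto

-- membership in the elevisor set built by B's outer loop
theorem sev_mem_elev (cnt : PySem.Dict Int Int) (keys : List Int) :
    ∀ (e : PySem.Set Int) (s : Int),
      (s ∈ keys.foldl (fun e y => sevDivLoop cnt y y.natAbs 1 e) e
        ↔ s ∈ e ∨ ∃ y ∈ keys, s ≠ y ∧ cnt.contains s = true ∧ y ≠ 0 ∧ s ∣ y) := by
  induction keys with
  | nil => simp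
  | cons y t ih =>
    intro e s
    rw [List.foldl_cons, ih]
    rw [sev_mem_divLoop cnt y y.natAbs (y.natAbs + 1 - 1) 1 rfl (by omega)]
    constructor
    · rintro ((hmem | ⟨hne, hcont, k, hk1, hkk, hkdvd, hs⟩) | ⟨z, hz, hrest⟩)
      · exact Or.inl hmem
      · have hkpos : 1 ≤ k * k := Nat.mul_le_mul hk1 hk1
        have hay : 1 ≤ y.natAbs := by omega
        refine Or.inr ⟨y, by simp, hne, hcont, fun h0 => by simp [h0] at hay, ?_⟩
        exact Int.natAbs_dvd_natAbs.mp
          ((sev_exists_k_iff y.natAbs s hay).mp ⟨k, hk1, hkk, hkdvd, hs⟩)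
      · exact Or.inr ⟨z, by simp [hz], hrest⟩
    · rintro (hmem | ⟨z, hz, hne, hcont, hz0, hdvd⟩)
      · exact Or.inl (Or.inl hmem)
      · rcases List.mem_cons.mp hz with rfl | hzt
        · have hay : 1 ≤ z.natAbs := by
            rcases Nat.eq_zero_or_pos z.natAbs with h0 | h0
            · exact absurd (Int.natAbs_eq_zero.mp h0) hz0
            · exact h0
          obtain ⟨k, hk1, hkk, hkdvd, hs⟩ :=
            (sev_exists_k_iff z.natAbs s hay).mpr (Int.natAbs_dvd_natAbs.mpr hdvd)
          exact Or.inl (Or.inr ⟨hne, hcont, k, hk1, hkk, hkdvd, hs⟩)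
        · exact Or.inr ⟨z, hzt, hne, hcont, hz0, hdvd⟩

-- B computes the grouped sum over distinct values
theorem sev_alt_eq_sum (E : List Int) :
    sev_alt E = ((PySem.Set.ofList E).map
      (fun x => if ((∃ y ∈ E, x ≠ y ∧ y ≠ 0 ∧ x ∣ y) ∨ 2 ≤ E.count x)
        then x * (E.count x : Int) else 0)).sum := by
  have hcnt : E.foldl (fun d v => d.insert v (d.getD v 0 + 1)) PySem.Dict.empty
      = PySem.Dict.counter E := PySem.Dict.foldl_insert_getD_add_one_eq_counter E
  show (PySem.Dict.items (E.foldl (fun d v => d.insert v (d.getD v 0 + 1)) PySem.Dict.empty)).foldl _ 0 = _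
  rw [hcnt]
  rw [sev_foldl_ite_add ((PySem.Dict.counter E).items)
    (fun xc => PySem.Set.contains
      ((PySem.Dict.keys (PySem.Dict.counter E)).foldl
        (fun e y => sevDivLoop (PySem.Dict.counter E) y y.natAbs 1 e) PySem.Set.empty) xc.1
      || decide ((2 : Int) ≤ xc.2))
    (fun xc => xc.1 * xc.2) 0]
  rw [PySem.Dict.items_counter, List.map_map]
  simp only [zero_add]
  refine congrArg List.sum (List.map_congr_left ?_)
  intro x hx
  have hxE : x ∈ E := (PySem.Set.mem_ofList _ _).mp hx
  have hcond : (PySem.Set.contains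
      ((PySem.Dict.keys (PySem.Dict.counter E)).foldl
        (fun e y => sevDivLoop (PySem.Dict.counter E) y y.natAbs 1 e) PySem.Set.empty) x
      || decide ((2 : Int) ≤ (E.count x : Int))) = true
      ↔ ((∃ y ∈ E, x ≠ y ∧ y ≠ 0 ∧ x ∣ y) ∨ 2 ≤ E.count x) := by
    rw [Bool.or_eq_true, PySem.Set.contains_iff, decide_eq_true_iff]
    rw [sev_mem_elev, PySem.Dict.keys_counter]
    constructor
    · rintro ((hmem | ⟨y, hy, hne, -, hy0, hdvd⟩) | hge)
      · cases hmem
      · exact Or.inl ⟨y, (PySem.Set.mem_ofList _ _).mp hy, hne, hy0, hdvd⟩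
      · exact Or.inr (by exact_mod_cast hge)
    · rintro (⟨y, hy, hne, hy0, hdvd⟩ | hge)
      · refine Or.inl (Or.inr ⟨y, (PySem.Set.mem_ofList _ _).mpr hy, hne, ?_, hy0, hdvd⟩)
        rw [PySem.Dict.contains_counter]
        simp [List.contains_iff_mem, hxE]
      · exact Or.inr (by exact_mod_cast hge)
    
  simp only [Function.comp_apply]
  by_cases hp : ((∃ y ∈ E, x ≠ y ∧ y ≠ 0 ∧ x ∣ y) ∨ 2 ≤ E.count x)
  · rw [if_pos (hcond.mpr hp), if_pos hp]
  · rw [if_neg (fun hc => hp (hcond.mp hc)), if_neg hp]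

-- lists of length ≤ 1 have only equal members
theorem sev_len_le_one_eq (l : List Int) (hl : l.length ≤ 1) :
    ∀ a ∈ l, ∀ b ∈ l, a = b := by
  match l with
  | [] => simp
  | [a] => simp
  | a :: b :: t => simp at hl

-- ===== VERDICT (by name: the statement is the Claim_ definition above) =====
theorem sev_spec : Claim_equal_sev := by
  intro E _ hPre
  show sev E = sev_alt E
  rw [sev_eq_sum, sev_alt_eq_sum]
  have hQ : ∀ x ∈ PySem.Set.ofList E,
      (fun x => if ((∃ y ∈ E, x ≠ y ∧ y ≠ 0 ∧ x ∣ y) ∨ 2 ≤ E.count x)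
        then x * (E.count x : Int) else 0) x
      = (fun x => if sevP E x then x * (E.count x : Int) else 0) x := by
    intro x hx
    have hxE : x ∈ E := (PySem.Set.mem_ofList _ _).mp hx
    have : ((∃ y ∈ E, x ≠ y ∧ y ≠ 0 ∧ x ∣ y) ∨ 2 ≤ E.count x) ↔ sevP E x := by
      constructor
      · rintro (⟨y, hy, hne, -, hdvd⟩ | hge)
        · exact Or.inl ⟨y, hy, Ne.symm hne, hdvd⟩
        · exact Or.inr hge
      · rintro (⟨y, hy, hne, hdvd⟩ | hge)
        · refine Or.inl ⟨y, hy, Ne.symm hne, ?_, hdvd⟩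
          intro h0
          subst h0
          exact hne (sev_len_le_one_eq E (hPre hy) _ hy _ hxE)
        · exact Or.inr hge
    simp only [this]
  rw [List.map_congr_left hQ]
  rw [Finset.sum_list_map_count E (fun x => if sevP E x then x else 0)]
  rw [← List.sum_toFinset _ (PySem.Set.nodup_ofList E)]
  have hfin : (PySem.Set.ofList E).toFinset = E.toFinset := by
    ext a; simp [PySem.Set.mem_ofList]
  rw [hfin]
  apply Finset.sum_congr rfl
  intro x _
  by_cases h : sevP E x
  · simp only [h, if_true, nsmul_eq_mul]
    ring
  · simp [h]
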